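-- pv_equiv track=rewrite | github.com/ismailperachaprogramming/SB_ep_titles | src/02_title_gen.py | limit_the
-- ===== SOURCE A (Python) =====
-- def limit_the(title: str, max_the: int):
--     words = title.split()
--     count = 0
--     out = []
--     for w in words:
--         if w.lower() == "the":
--             count += 1
--             if count > max_the:
--                 continue
--         out.append(w)
--     return " ".join(out)
-- ===== SOURCE B (Python) =====
-- def limit_the(title: str, max_the: int):
--     words = title.split()
--     the_idx = [i for i, w in enumerate(words) if w.lower() == "the"]
--     drop = set(the_idx[max(max_the, 0):])
--     return " ".join(w for i, w in enumerate(words) if i not in drop)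
-- ===== Notes on version B (the rewrite author's own statement) =====
-- stated objective: alternative
-- what changed: Replaces the single counter-and-continue loop by an index-table-then-filter structure: one pass collects the indices of 'the' words, the indices past max_the form a drop-set, and a second pass joins the words whose position is not in that set.
import Mathlib
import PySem

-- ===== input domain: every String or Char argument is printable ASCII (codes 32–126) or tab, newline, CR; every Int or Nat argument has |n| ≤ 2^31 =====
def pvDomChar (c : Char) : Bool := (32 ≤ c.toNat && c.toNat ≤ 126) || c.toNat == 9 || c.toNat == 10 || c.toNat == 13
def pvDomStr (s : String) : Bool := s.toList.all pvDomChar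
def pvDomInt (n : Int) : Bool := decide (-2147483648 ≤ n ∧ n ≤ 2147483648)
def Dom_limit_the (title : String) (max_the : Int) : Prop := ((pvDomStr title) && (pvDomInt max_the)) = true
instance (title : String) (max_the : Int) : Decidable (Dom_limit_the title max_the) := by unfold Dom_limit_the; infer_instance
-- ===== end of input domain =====

-- B replaces A's counter-and-continue loop by an index-table-then-filter structure (alternative decomposition, same cost).


-- ===== PORT A =====
def limit_the (title : String) (max_the : Int) : String :=
  let words := PySem.Str.split₀ title
  let st := words.foldl (fun (st : Int × List String) w =>
      if PySem.Str.lower w == "the" then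
        let count := st.1 + 1
        if count > max_the then (count, st.2) else (count, st.2 ++ [w])
      else (st.1, st.2 ++ [w])) (0, [])
  PySem.Str.join " " st.2

-- ===== PORT B =====
def limit_the_alt (title : String) (max_the : Int) : String :=
  let words := PySem.Str.split₀ title
  let theIdx := (PySem.List.enumerate words).filterMap
    (fun p => if PySem.Str.lower p.2 == "the" then some p.1 else none)
  let drop : PySem.Set Int := PySem.Set.ofList (PySem.List.slice theIdx (some (max max_the 0)) none)
  PySem.Str.join " " ((PySem.List.enumerate words).filterMap
    (fun p => if PySem.Set.contains drop p.1 then none else some p.2))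

-- ===== PRECONDITION & SPEC =====
def Spec_limit_the (title : String) (max_the : Int) (out : String) : Prop := out = limit_the_alt title max_the
instance (title : String) (max_the : Int) (out : String) : Decidable (Spec_limit_the title max_the out) := by unfold Spec_limit_the; infer_instance

-- ===== CLAIM (what is proved, stated in full; the proofs are below) =====
def Claim_equal_limit_the : Prop := ∀ (title : String) (max_the : Int), Dom_limit_the title max_the → Spec_limit_the title max_the (limit_the title max_the)

-- ===== LEMMAS AND PROOFS =====

-- A's kept word list, as a structural recursion on the word list with the running 'the' count c.
def pvAuxA (m : Int) : List String → Int → List String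
  | [], _ => []
  | w :: ws, c =>
    if PySem.Str.lower w == "the" then
      (if c + 1 > m then pvAuxA m ws (c + 1) else w :: pvAuxA m ws (c + 1))
    else w :: pvAuxA m ws c

lemma pvFoldA (m : Int) : ∀ (ws : List String) (c : Int) (out : List String),
    (ws.foldl (fun (st : Int × List String) w =>
      if PySem.Str.lower w == "the" then
        let count := st.1 + 1
        if count > m then (count, st.2) else (count, st.2 ++ [w])
      else (st.1, st.2 ++ [w])) (c, out)).2 = out ++ pvAuxA m ws c := by
  intro ws
  induction ws with
  | nil => intro c out; simp [pvAuxA]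
  | cons w ws ih =>
    intro c out
    rw [List.foldl_cons]
    by_cases h : (PySem.Str.lower w == "the") = true
    · by_cases h2 : c + 1 > m
      · have hstep : (if (PySem.Str.lower w == "the") = true then
              let count := (c, out).1 + 1
              if count > m then (count, (c, out).2) else (count, (c, out).2 ++ [w])
            else ((c, out).1, (c, out).2 ++ [w])) = ((c + 1 : Int), out) := by
          simp [h, h2]
        rw [hstep, ih]
        conv_rhs => rw [pvAuxA]
        simp [h, h2]
      · have hstep : (if (PySem.Str.lower w == "the") = true then
              let count := (c, out).1 + 1
              if count > m then (count, (c, out).2) else (count, (c, out).2 ++ [w])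
            else ((c, out).1, (c, out).2 ++ [w])) = ((c + 1 : Int), out ++ [w]) := by
          simp [h, h2]
        rw [hstep, ih]
        conv_rhs => rw [pvAuxA]
        simp [h, h2]
    · have hstep : (if (PySem.Str.lower w == "the") = true then
            let count := (c, out).1 + 1
            if count > m then (count, (c, out).2) else (count, (c, out).2 ++ [w])
          else ((c, out).1, (c, out).2 ++ [w])) = ((c : Int), out ++ [w]) := by
        simp [h]
      rw [hstep, ih]
      conv_rhs => rw [pvAuxA]
      simp [h]

-- indices (from offset s) of the 'the' words
def pvTheIdx (ws : List String) (s : Int) : List Int :=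
  (PySem.List.enumerate ws s).filterMap
    (fun p => if PySem.Str.lower p.2 == "the" then some p.1 else none)

lemma pvTheIdx_cons_pos (w : String) (ws : List String) (s : Int)
    (h : (PySem.Str.lower w == "the") = true) :
    pvTheIdx (w :: ws) s = s :: pvTheIdx ws (s + 1) := by
  have h' : PySem.Str.lower w = "the" := by simpa using h
  simp [pvTheIdx, PySem.List.enumerate_cons, h']

lemma pvTheIdx_cons_neg (w : String) (ws : List String) (s : Int)
    (h : ¬ (PySem.Str.lower w == "the") = true) :
    pvTheIdx (w :: ws) s = pvTheIdx ws (s + 1) := by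
  have h' : ¬ PySem.Str.lower w = "the" := by simpa using h
  simp [pvTheIdx, PySem.List.enumerate_cons, h']

lemma pvTheIdx_ge : ∀ (ws : List String) (s : Int) (x : Int), x ∈ pvTheIdx ws s → s ≤ x := by
  intro ws
  induction ws with
  | nil => intro s x hx; simp [pvTheIdx, PySem.List.enumerate_nil] at hx
  | cons w ws ih =>
    intro s x hx
    by_cases h : (PySem.Str.lower w == "the") = true
    · rw [pvTheIdx_cons_pos w ws s h] at hx
      rcases List.mem_cons.mp hx with h1 | h1
      · omega
      · have := ih (s + 1) x h1; omega
    · rw [pvTheIdx_cons_neg w ws s h] at hx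
      have := ih (s + 1) x hx; omega

lemma pvDrop_ge (ws : List String) (s : Int) (k : Nat) (x : Int)
    (hx : x ∈ (pvTheIdx ws s).drop k) : s ≤ x :=
  pvTheIdx_ge ws s x (List.mem_of_mem_drop hx)

-- the second pass of B (drop-set as plain list membership) equals A's recursion, budget k = (m - c).toNat
lemma pvMain (m : Int) : ∀ (ws : List String) (s c : Int),
    (PySem.List.enumerate ws s).filterMap
      (fun p => if p.1 ∈ (pvTheIdx ws s).drop (m - c).toNat then none else some p.2)
    = pvAuxA m ws c := by
  intro ws
  induction ws with
  | nil => intro s c; simp [PySem.List.enumerate_nil, pvAuxA]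
  | cons w ws ih =>
    intro s c
    by_cases h : (PySem.Str.lower w == "the") = true
    · rw [pvTheIdx_cons_pos w ws s h, PySem.List.enumerate_cons]
      by_cases hk : (m - c).toNat = 0
      · have hm : c + 1 > m := by omega
        have hf : (fun (p : Int × String) =>
            if p.1 ∈ ((s :: pvTheIdx ws (s + 1)).drop (m - c).toNat) then none else some p.2)
            ((s, w)) = none := by
          simp [hk]
        rw [List.filterMap_cons_none (f := fun (p : Int × String) =>
            if p.1 ∈ ((s :: pvTheIdx ws (s + 1)).drop (m - c).toNat) then none else some p.2)
            (a := ((s, w) : Int × String)) (l := PySem.List.enumerate ws (s + 1)) hf]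
        have hcong : ∀ p ∈ PySem.List.enumerate ws (s + 1),
            (if p.1 ∈ ((s :: pvTheIdx ws (s + 1)).drop (m - c).toNat) then (none : Option String) else some p.2)
            = (if p.1 ∈ ((pvTheIdx ws (s + 1)).drop (m - (c + 1)).toNat) then none else some p.2) := by
          intro p hp
          obtain ⟨j, hj, rfl⟩ := (PySem.List.mem_enumerate_iff ws (s + 1) p).mp hp
          have hk2 : (m - (c + 1)).toNat = 0 := by omega
          have hne : s + 1 + (j : Int) ≠ s := by omega
          simp [hk, hk2, hne]
        rw [List.filterMap_congr hcong, ih (s + 1) (c + 1)]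
        conv_rhs => rw [pvAuxA]
        simp [h, hm]
      · have hm : ¬ (c + 1 > m) := by omega
        obtain ⟨k', hk'⟩ : ∃ k', (m - c).toNat = k' + 1 := ⟨(m - c).toNat - 1, by omega⟩
        have hk2 : (m - (c + 1)).toNat = k' := by omega
        have hs : ((s, w) : Int × String).1 ∉ ((s :: pvTheIdx ws (s + 1)).drop (m - c).toNat) := by
          rw [hk', List.drop_succ_cons]
          intro hmem
          have := pvDrop_ge ws (s + 1) k' s hmem
          omega
        have hf : (fun (p : Int × String) =>
            if p.1 ∈ ((s :: pvTheIdx ws (s + 1)).drop (m - c).toNat) then none else some p.2)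
            ((s, w)) = some w := by
          simp only [if_neg hs]
        rw [List.filterMap_cons_some (f := fun (p : Int × String) =>
            if p.1 ∈ ((s :: pvTheIdx ws (s + 1)).drop (m - c).toNat) then none else some p.2)
            (a := ((s, w) : Int × String)) (l := PySem.List.enumerate ws (s + 1)) (b := w) hf]
        have hcong : ∀ p ∈ PySem.List.enumerate ws (s + 1),
            (if p.1 ∈ ((s :: pvTheIdx ws (s + 1)).drop (m - c).toNat) then (none : Option String) else some p.2)
            = (if p.1 ∈ ((pvTheIdx ws (s + 1)).drop (m - (c + 1)).toNat) then none else some p.2) := by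
          intro p hp
          rw [hk', List.drop_succ_cons, hk2]
        rw [List.filterMap_congr hcong, ih (s + 1) (c + 1)]
        conv_rhs => rw [pvAuxA]
        simp [h, hm]
    · rw [pvTheIdx_cons_neg w ws s h, PySem.List.enumerate_cons]
      have hs : ((s, w) : Int × String).1 ∉ ((pvTheIdx ws (s + 1)).drop (m - c).toNat) := by
        intro hmem
        have := pvDrop_ge ws (s + 1) _ s hmem
        omega
      have hf : (fun (p : Int × String) =>
          if p.1 ∈ ((pvTheIdx ws (s + 1)).drop (m - c).toNat) then none else some p.2)
          ((s, w)) = some w := by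
        simp only [if_neg hs]
      rw [List.filterMap_cons_some (f := fun (p : Int × String) =>
          if p.1 ∈ ((pvTheIdx ws (s + 1)).drop (m - c).toNat) then none else some p.2)
          (a := ((s, w) : Int × String)) (l := PySem.List.enumerate ws (s + 1)) (b := w) hf,
        ih (s + 1) c]
      conv_rhs => rw [pvAuxA]
      simp [h]

-- ===== VERDICT (by name: the statement is the Claim_ definition above) =====
theorem limit_the_spec : Claim_equal_limit_the := by
  intro title m _
  unfold Spec_limit_the limit_the limit_the_alt
  simp only []
  congr 1
  rw [pvFoldA m (PySem.Str.split₀ title) 0 [], List.nil_append]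
  have hidx : ((PySem.List.enumerate (PySem.Str.split₀ title) 0).filterMap
      (fun p => if PySem.Str.lower p.2 == "the" then some p.1 else none))
      = pvTheIdx (PySem.Str.split₀ title) 0 := rfl
  have hslice : PySem.List.slice (pvTheIdx (PySem.Str.split₀ title) 0) (some (max m 0)) none
      = (pvTheIdx (PySem.Str.split₀ title) 0).drop (m - 0).toNat := by
    rw [PySem.List.slice_from _ (le_max_right m 0)]
    congr 1
    omega
  have hcong : ∀ p ∈ PySem.List.enumerate (PySem.Str.split₀ title) 0,
      (if PySem.Set.contains (PySem.Set.ofList (PySem.List.slice (pvTheIdx (PySem.Str.split₀ title) 0) (some (max m 0)) none)) p.1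
        then (none : Option String) else some p.2)
      = (if p.1 ∈ ((pvTheIdx (PySem.Str.split₀ title) 0).drop (m - 0).toNat) then none else some p.2) := by
    intro p _
    rw [hslice]
    simp
  rw [hidx, List.filterMap_congr hcong, pvMain m (PySem.Str.split₀ title) 0 0]
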